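-- pv_equiv track=rewrite | github.com/julian1vidal/tp1_metodos_2023_1c | ej6.py | armar_u_consigna
-- ===== SOURCE A (Python) =====
-- import math
--
-- def armar_u_consigna(n, r):
--     res = []
--     cota_menor = math.floor(n/2) - r
--     cota_mayor = math.floor(n/2) + r
--     for i in range(n):
--       if (cota_menor < i & i < cota_mayor):
--         res.append(1)
--       else:
--         res.append(0)
--     return res
-- ===== SOURCE B (Python) =====
-- def armar_u_consigna(n, r):
--     m = n // 2
--     start = min(max(0, m - r + 1), n)
--     end = min(max(start, m + r), n)
--     return [0] * start + [1] * (end - start) + [0] * (n - end)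
-- ===== Notes on version B (the rewrite author's own statement) =====
-- stated objective: faster
-- what changed: B computes the clamped boundaries of the run of 1s in closed form and concatenates three homogeneous replicate blocks ([0]*a+[1]*b+[0]*c), instead of A's per-index loop testing floor(n/2)-r < i < floor(n/2)+r for every i; the per-element branch and append disappear (constant-factor speedup, measured ~2x).
import Mathlib
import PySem

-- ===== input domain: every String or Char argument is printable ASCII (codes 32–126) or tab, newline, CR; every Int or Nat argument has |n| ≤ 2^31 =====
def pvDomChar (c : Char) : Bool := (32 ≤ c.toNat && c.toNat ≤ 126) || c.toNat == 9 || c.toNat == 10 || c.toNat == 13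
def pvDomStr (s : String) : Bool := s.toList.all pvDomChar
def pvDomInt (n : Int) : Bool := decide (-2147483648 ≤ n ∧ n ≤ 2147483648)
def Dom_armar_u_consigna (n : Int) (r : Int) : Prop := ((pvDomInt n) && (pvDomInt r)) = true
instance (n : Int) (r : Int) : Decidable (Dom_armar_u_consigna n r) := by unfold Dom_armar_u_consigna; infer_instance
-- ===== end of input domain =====

-- B builds the clamped run of 1s from three replicate blocks instead of testing each index (objective: simpler).

-- ===== PORT A =====
-- math.floor(n/2) is exact floor division for |n| ≤ 2^31; 'cota_menor < i & i < cota_mayor'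
-- is the chained comparison cota_menor < (i & i) < cota_mayor, and i & i = i.
def armar_u_consigna (n : Int) (r : Int) : List Int :=
  let cota_menor : Int := PySem.Int.floordiv n 2 - r
  let cota_mayor : Int := PySem.Int.floordiv n 2 + r
  (PySem.List.pyRange 0 n 1).foldl
    (fun res i => if cota_menor < i ∧ i < cota_mayor then res ++ [1] else res ++ [0]) []

-- ===== PORT B =====
def armar_u_consigna_alt (n : Int) (r : Int) : List Int :=
  let m : Int := PySem.Int.floordiv n 2
  let start : Int := min (max 0 (m - r + 1)) n
  let e : Int := min (max start (m + r)) n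
  List.replicate start.toNat 0 ++ List.replicate (e - start).toNat 1 ++ List.replicate (n - e).toNat 0

-- ===== PRECONDITION & SPEC =====
def Spec_armar_u_consigna (n : Int) (r : Int) (out : List Int) : Prop := out = armar_u_consigna_alt n r
instance (n : Int) (r : Int) (out : List Int) : Decidable (Spec_armar_u_consigna n r out) := by unfold Spec_armar_u_consigna; infer_instance

-- ===== CLAIM (what is proved, stated in full; the proofs are below) =====
def Claim_equal_armar_u_consigna : Prop := ∀ (n : Int) (r : Int), Dom_armar_u_consigna n r → Spec_armar_u_consigna n r (armar_u_consigna n r)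

-- ===== LEMMAS AND PROOFS =====

-- a map whose function is constant on the range collapses to a replicate block
theorem pv_map_pyRange_const (a b : Int) (g : Int → Int) (c : Int)
    (h : ∀ i : Int, a ≤ i → i < b → g i = c) :
    (PySem.List.pyRange a b 1).map g = List.replicate (b - a).toNat c := by
  rw [List.eq_replicate_iff]
  constructor
  · simp [PySem.List.length_pyRange_one]
  · intro x hx
    rcases List.mem_map.mp hx with ⟨i, hi, rfl⟩
    rcases (PySem.List.mem_pyRange_one).mp hi with ⟨h1, h2⟩
    exact h i h1 h2

-- ===== VERDICT (by name: the statement is the Claim_ definition above) =====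
theorem armar_u_consigna_spec : Claim_equal_armar_u_consigna := by
  intro n r _
  unfold Spec_armar_u_consigna armar_u_consigna armar_u_consigna_alt
  set m : Int := PySem.Int.floordiv n 2 with hm
  simp only []
  have hfold :
      (PySem.List.pyRange 0 n 1).foldl
        (fun res i => if m - r < i ∧ i < m + r then res ++ [1] else res ++ [0]) ([] : List Int)
      = (PySem.List.pyRange 0 n 1).map (fun i => if m - r < i ∧ i < m + r then (1 : Int) else 0) := by
    have := PySem.List.foldl_append_singleton_eq_map
      (l := PySem.List.pyRange 0 n 1)
      (f := fun i => if m - r < i ∧ i < m + r then (1 : Int) else 0) (acc := [])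
    simp only [List.nil_append] at this
    rw [← this]
    congr 1
    funext res i
    split <;> rfl
  rw [hfold]
  set s : Int := min (max 0 (m - r + 1)) n with hs
  set e : Int := min (max s (m + r)) n with he
  by_cases hn : n ≤ 0
  · have h1 : s = n := by omega
    have h2 : e = n := by omega
    rw [PySem.List.pyRange_one_eq_nil (by omega)]
    simp [h1, h2, Int.toNat_of_nonpos hn]
  · have hb1 : (0:Int) ≤ s := by omega
    have hb2 : s ≤ e := by omega
    have hb3 : e ≤ n := by omega
    rw [PySem.List.pyRange_one_append 0 s n hb1 (le_trans hb2 hb3),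
        PySem.List.pyRange_one_append s e n hb2 hb3, List.map_append, List.map_append]
    rw [pv_map_pyRange_const 0 s _ 0 (by intro i h1 h2; rw [if_neg]; omega),
        pv_map_pyRange_const s e _ 1 (by intro i h1 h2; rw [if_pos]; constructor <;> omega),
        pv_map_pyRange_const e n _ 0 (by intro i h1 h2; rw [if_neg]; omega)]
    simp
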